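-- pv_equiv track=rewrite | github.com/KellieGadeken/Calculator | CalculatorProject_COSC505_Gadeken.py | check_user_input
-- ===== SOURCE A (Python) =====
-- def check_user_input(user_input):
--
--     #test for special characters
--     special_characters = ['!','@','#','$','%','^','&','*','(',')','-','+','?','_','=',',','<','>','/','"']
--     if any(c in special_characters for c in user_input):
--         return "Please input the correct format and number of values for your calculation."
--
--     #test for letters
--     elif any(c.isalpha() for c in user_input):
--         return "Please input the correct format and number of values for your calculation."
--
--     # test for whitespaces to be included
--     elif not (" ") in user_input:
--         return "Please input the correct format and number of values for your calculation."
--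
--     else:
--         return ""
-- ===== SOURCE B (Python) =====
-- def check_user_input(user_input):
--     # One pass: classify every character, decide once at the end.
--     special = {'!','@','#','$','%','^','&','*','(',')','-','+','?','_','=',',','<','>','/','"'}
--     has_special = has_alpha = has_space = False
--     for c in user_input:
--         if c in special:
--             has_special = True
--         if c.isalpha():
--             has_alpha = True
--         if c == ' ':
--             has_space = True
--     if not has_special and not has_alpha and has_space:
--         return ""
--     return "Please input the correct format and number of values for your calculation."
-- ===== Notes on version B (the rewrite author's own statement) =====
-- stated objective: simpler
-- what changed: Replaces A's three separate short-circuit scans (any special, any alpha, substring space test) with a single classification pass maintaining three boolean flags (special set membership instead of list membership) and one final decision.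
import Mathlib
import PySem

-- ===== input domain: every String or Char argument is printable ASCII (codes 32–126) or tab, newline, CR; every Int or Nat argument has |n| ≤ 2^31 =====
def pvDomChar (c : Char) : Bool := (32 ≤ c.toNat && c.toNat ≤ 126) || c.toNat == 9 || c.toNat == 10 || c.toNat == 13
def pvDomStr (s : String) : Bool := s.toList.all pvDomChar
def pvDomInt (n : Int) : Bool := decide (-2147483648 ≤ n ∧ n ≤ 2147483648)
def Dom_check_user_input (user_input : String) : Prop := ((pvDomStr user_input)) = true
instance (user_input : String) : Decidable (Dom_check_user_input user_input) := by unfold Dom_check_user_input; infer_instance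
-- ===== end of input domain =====

-- B replaces A's three separate short-circuit scans with one classification pass and a single final decision (simpler decomposition, same O(n) cost).

-- ===== PORT A =====
def pvErrMsg : String := "Please input the correct format and number of values for your calculation."

def pvSpecialsA : List Char := ['!','@','#','$','%','^','&','*','(',')','-','+','?','_','=',',','<','>','/','"']

def check_user_input (user_input : String) : String :=
  if user_input.toList.any (fun c => pvSpecialsA.contains c) then pvErrMsg
  else if user_input.toList.any (fun c => PySem.Chars.isalpha c) then pvErrMsg
  else if ¬ (PySem.Str.isIn " " user_input = true) then pvErrMsg
  else ""

-- ===== PORT B =====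
def pvSpecialsB : PySem.Set Char := PySem.Set.ofList ['!','@','#','$','%','^','&','*','(',')','-','+','?','_','=',',','<','>','/','"']

def pvStepB (st : Bool × Bool × Bool) (c : Char) : Bool × Bool × Bool :=
  ( if pvSpecialsB.contains c then true else st.1
  , if PySem.Chars.isalpha c then true else st.2.1
  , if c == ' ' then true else st.2.2 )

def check_user_input_alt (user_input : String) : String :=
  let st := user_input.toList.foldl pvStepB (false, false, false)
  if !st.1 && !st.2.1 && st.2.2 then ""
  else "Please input the correct format and number of values for your calculation."

-- ===== PRECONDITION & SPEC =====
def Spec_check_user_input (user_input : String) (out : String) : Prop := out = check_user_input_alt user_input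
instance (user_input : String) (out : String) : Decidable (Spec_check_user_input user_input out) := by unfold Spec_check_user_input; infer_instance

-- ===== CLAIM (what is proved, stated in full; the proofs are below) =====
def Claim_equal_check_user_input : Prop := ∀ (user_input : String), Dom_check_user_input user_input → Spec_check_user_input user_input (check_user_input user_input)

-- ===== LEMMAS AND PROOFS =====

-- the fold computes the three 'any' flags
theorem pvFoldB_eq (l : List Char) (s a sp : Bool) :
    l.foldl pvStepB (s, a, sp)
      = ( s || l.any (fun c => pvSpecialsB.contains c)
        , a || l.any (fun c => PySem.Chars.isalpha c)
        , sp || l.any (fun c => c == ' ') ) := by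
  induction l generalizing s a sp with
  | nil => simp
  | cons c t ih =>
      simp only [List.foldl_cons, List.any_cons, pvStepB]
      rw [ih]
      cases hs : pvSpecialsB.contains c <;> cases ha : PySem.Chars.isalpha c <;>
        cases hsp : (c == ' ') <;> simp

theorem pvSpecials_agree (c : Char) : pvSpecialsB.contains c = pvSpecialsA.contains c := by
  simp [pvSpecialsB, pvSpecialsA, PySem.Set.ofList, PySem.Set.contains]

theorem pvSpaceIn (s : String) : PySem.Str.isIn " " s = s.toList.any (fun c => c == ' ') := by
  have h : PySem.Str.isIn " " s = true ↔ (' ' ∈ s.toList) := by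
    rw [PySem.Str.isIn_eq]
    rw [PySem.Chars.isIn_iff_infix]
    simpa using List.singleton_infix_iff ' ' s.toList
  rcases hb : s.toList.any (fun c => c == ' ') with _ | _
  · simp only [List.any_eq_false] at hb
    rcases hi : PySem.Str.isIn " " s with _ | _
    · rfl
    · exact absurd (hb _ (h.mp hi)) (by simp)
  · simp only [List.any_eq_true] at hb
    obtain ⟨c, hc, hcc⟩ := hb
    exact h.mpr (by rwa [show c = ' ' from by simpa using hcc] at hc)

-- ===== VERDICT (by name: the statement is the Claim_ definition above) =====
theorem check_user_input_spec : Claim_equal_check_user_input := by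
  intro s _
  unfold Spec_check_user_input check_user_input check_user_input_alt
  rw [pvFoldB_eq]
  simp only [Bool.false_or]
  have hsp : (fun c => pvSpecialsB.contains c) = (fun c => pvSpecialsA.contains c) := by
    funext c; exact pvSpecials_agree c
  rw [hsp, ← pvSpaceIn]
  cases h1 : s.toList.any (fun c => pvSpecialsA.contains c) <;>
    cases h2 : s.toList.any (fun c => PySem.Chars.isalpha c) <;>
    cases h3 : PySem.Str.isIn " " s <;> simp [pvErrMsg]
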